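-- pv_equiv track=rewrite | github.com/pvaras8/PockLigGPT | pockliggpt/rl/prompts.py | split_selfies
-- ===== SOURCE A (Python) =====
-- from typing import Dict, List, Optional
--
-- def split_selfies(selfies: str) -> List[str]:
--     tokens = []
--     token = ""
--     for char in selfies:
--         token += char
--         if char == "]":
--             tokens.append(token)
--             token = ""
--     return tokens
-- ===== SOURCE B (Python) =====
-- def split_selfies(selfies: str):
--     parts = selfies.split("]")
--     return [p + "]" for p in parts[:-1]]
-- ===== Notes on version B (the rewrite author's own statement) =====
-- stated objective: simpler
-- what changed: Replaces the char-by-char accumulate-and-flush loop with str.split(']') and a comprehension that reattaches the delimiter to every piece except the trailing remainder.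
import Mathlib
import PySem

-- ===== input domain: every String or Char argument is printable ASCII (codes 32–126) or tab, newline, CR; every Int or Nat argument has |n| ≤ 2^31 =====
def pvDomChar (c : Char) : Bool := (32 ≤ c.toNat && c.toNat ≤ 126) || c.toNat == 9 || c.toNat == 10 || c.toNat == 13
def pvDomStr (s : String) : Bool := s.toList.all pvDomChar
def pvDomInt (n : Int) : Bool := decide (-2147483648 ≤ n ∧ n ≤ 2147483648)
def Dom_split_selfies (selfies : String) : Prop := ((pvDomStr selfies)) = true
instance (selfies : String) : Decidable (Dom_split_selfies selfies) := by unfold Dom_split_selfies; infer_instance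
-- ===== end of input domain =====

-- B replaces A's char-by-char accumulate-and-flush loop with split(']') plus reattaching the delimiter (objective: simpler).


-- ===== PORT A =====
-- A's loop: token accumulates characters (as List Char, appended on the right
-- exactly as Python's `token += char`), flushed to tokens on ']'.
def splitSelfiesLoopA : List Char → List String → List Char → List String
  | [], tokens, _ => tokens
  | c :: rest, tokens, token =>
    let token' := token ++ [c]
    if c = ']' then splitSelfiesLoopA rest (tokens ++ [String.ofList token']) []
    else splitSelfiesLoopA rest tokens token'

def split_selfies (selfies : String) : List String :=
  splitSelfiesLoopA selfies.toList [] []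

-- ===== PORT B =====
def split_selfies_alt (selfies : String) : List String :=
  let parts := PySem.Chars.splitOn selfies.toList [']']
  (parts.dropLast).map (fun p => String.ofList (p ++ [']']))

-- ===== PRECONDITION & SPEC =====
def Spec_split_selfies (selfies : String) (out : List String) : Prop := out = split_selfies_alt selfies
instance (selfies : String) (out : List String) : Decidable (Spec_split_selfies selfies out) := by unfold Spec_split_selfies; infer_instance

-- ===== CLAIM (what is proved, stated in full; the proofs are below) =====
def Claim_equal_split_selfies : Prop := ∀ (selfies : String), Dom_split_selfies selfies → Spec_split_selfies selfies (split_selfies selfies)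

-- ===== LEMMAS AND PROOFS =====

theorem splitSelfiesLoopA_acc (l : List Char) (tokens : List String) (token : List Char) :
    splitSelfiesLoopA l tokens token = tokens ++ splitSelfiesLoopA l [] token := by
  induction l generalizing tokens token with
  | nil => simp [splitSelfiesLoopA]
  | cons c rest ih =>
    simp only [splitSelfiesLoopA]
    split_ifs with h
    · rw [ih (tokens ++ [String.ofList (token ++ [c])]), ih ([] ++ [String.ofList (token ++ [c])])]
      simp
    · rw [ih tokens, ih []]

theorem splitOn_go_dropLast (fuel : Nat) (l cur : List Char) (acc : List (List Char))
    (h : l.length < fuel) :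
    ((PySem.Chars.splitOn.go [']'] fuel l cur acc).dropLast).map (fun p => String.ofList (p ++ [']'])) =
      acc.reverse.map (fun p => String.ofList (p ++ [']'])) ++ splitSelfiesLoopA l [] cur.reverse := by
  induction fuel generalizing l cur acc with
  | zero => omega
  | succ n ih =>
    cases l with
    | nil => simp [PySem.Chars.splitOn.go, splitSelfiesLoopA]
    | cons c rest =>
      by_cases hc : c = ']'
      · subst hc
        have : [']'].isPrefixOf (']' :: rest) = true := by simp [List.isPrefixOf]
        simp only [PySem.Chars.splitOn.go, this, if_pos, List.drop_succ_cons,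
          List.length_cons, List.length_nil, List.drop_zero] at *
        rw [ih rest [] ((cur.reverse) :: acc) (by omega)]
        simp only [splitSelfiesLoopA, List.reverse_cons, List.map_append,
          List.reverse_nil]
        rw [splitSelfiesLoopA_acc rest ([] ++ [String.ofList (cur.reverse ++ [']'])]) []]
        simp
      · have : [']'].isPrefixOf (c :: rest) = false := by
          simp [List.isPrefixOf]; intro h'; exact absurd h'.symm hc
        simp only [PySem.Chars.splitOn.go, this, Bool.false_eq_true, if_false]
        rw [ih rest (c :: cur) acc (by simp at h ⊢; omega)]
        simp [splitSelfiesLoopA, hc]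

-- ===== VERDICT (by name: the statement is the Claim_ definition above) =====
theorem split_selfies_spec : Claim_equal_split_selfies := by
  intro s _
  unfold Spec_split_selfies split_selfies split_selfies_alt PySem.Chars.splitOn
  rw [splitOn_go_dropLast _ _ _ _ (by omega)]
  simp
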